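-- pv_equiv track=rewrite | github.com/alfir777/skillbox_course_python-basic | lesson_011/02_prime_numbers.py | happy_prime_numbers_generator
-- ===== SOURCE A (Python) =====
-- def prime_numbers_generator(n):
--     prime_numbers = []
--     for number in range(2, n+1):
--         for prime in prime_numbers:
--             if number % prime == 0:
--                 break
--         else:
--             prime_numbers.append(number)
--             yield number
--     return prime_numbers
--
-- def sum_number(number):
--     summ=0
--     for n in number:
--         summ += int(n)
--     return summ
--
-- def happy_prime_numbers_generator(n):
--     for number in prime_numbers_generator(n):
--         size_number = len(str(number))
--         if size_number % 2 == 1 and size_number > 1: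
--             size = size_number // 2
--             left_number = str(number)[0:size]
--             right_number = str(number)[size+1:size_number]
--             left_number_sum = sum_number(left_number)
--             right_number_sum = sum_number(right_number)
--             if left_number_sum == right_number_sum:
--                 yield number
--         elif size_number > 1:
--             size = size_number // 2
--             left_number = str(number)[0:size]
--             right_number = str(number)[size:size_number]
--             left_number_sum = sum_number(left_number)
--             right_number_sum = sum_number(right_number)
--             if left_number_sum == right_number_sum:
--                 yield number
-- ===== SOURCE B (Python) =====
-- def happy_prime_numbers_generator(n):
--     # Sieve of Eratosthenes, then keep primes whose digit halves (middle digit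
--     # dropped for odd lengths) have equal digit sums.
--     if n < 2:
--         return
--     sieve = [True] * (n + 1)
--     i = 2
--     while i * i <= n:
--         if sieve[i]:
--             for j in range(i * i, n + 1, i):
--                 sieve[j] = False
--         i += 1
--     for p in range(2, n + 1):
--         if sieve[p]:
--             s = str(p)
--             h = len(s) // 2
--             if h and sum(map(int, s[:h])) == sum(map(int, s[-h:])):
--                 yield p
-- ===== Notes on version B (the rewrite author's own statement) =====
-- stated objective: faster
-- what changed: Replaces A's incremental trial division of every candidate against all previously found primes by a Sieve of Eratosthenes plus a direct digit-half sum check on each surviving prime.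
import Mathlib
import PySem

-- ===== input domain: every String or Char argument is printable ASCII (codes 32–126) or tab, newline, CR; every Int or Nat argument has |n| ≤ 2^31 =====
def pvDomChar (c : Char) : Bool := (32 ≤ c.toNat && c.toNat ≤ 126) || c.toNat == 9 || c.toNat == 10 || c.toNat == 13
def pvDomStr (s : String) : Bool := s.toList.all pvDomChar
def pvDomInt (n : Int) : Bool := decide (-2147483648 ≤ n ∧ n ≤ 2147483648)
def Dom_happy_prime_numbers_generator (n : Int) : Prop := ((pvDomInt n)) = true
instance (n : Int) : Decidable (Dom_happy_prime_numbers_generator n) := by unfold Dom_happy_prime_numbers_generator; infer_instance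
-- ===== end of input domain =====

-- B replaces A's trial division of every candidate against all smaller primes by a
-- Sieve of Eratosthenes (objective: faster); same return value on every int n.

-- int(c) for a single character c (both Pythons apply int only to decimal digits of str(number),
-- where ofChars? is exact and never none)
def pvDigitInt (c : Char) : Int := (PySem.Int.ofChars? [c]).getD 0

-- ===== PORT A =====
-- sum_number: summ = 0; for n in number: summ += int(n)
def pvSumNumber (cs : List Char) : Int :=
  cs.foldl (fun summ c => summ + pvDigitInt c) 0

-- the body of A's loop: the trial-division test against the primes found so far,
-- then (on a new prime) the digit-half comparison, appending to the yielded output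
def pvAStep (st : List Int × List Int) (number : Int) : List Int × List Int :=
  if st.1.any (fun prime => PySem.Int.mod number prime == 0) then st
  else
    let primes' := st.1 ++ [number]
    let s := PySem.Int.toChars number
    let sizeNumber : Int := (s.length : Int)
    if PySem.Int.mod sizeNumber 2 == 1 ∧ sizeNumber > 1 then
      let size := PySem.Int.floordiv sizeNumber 2
      let leftNumber := PySem.List.slice s (some 0) (some size)
      let rightNumber := PySem.List.slice s (some (size + 1)) (some sizeNumber)
      if pvSumNumber leftNumber == pvSumNumber rightNumber then (primes', st.2 ++ [number])
      else (primes', st.2)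
    else if sizeNumber > 1 then
      let size := PySem.Int.floordiv sizeNumber 2
      let leftNumber := PySem.List.slice s (some 0) (some size)
      let rightNumber := PySem.List.slice s (some size) (some sizeNumber)
      if pvSumNumber leftNumber == pvSumNumber rightNumber then (primes', st.2 ++ [number])
      else (primes', st.2)
    else (primes', st.2)

def happy_prime_numbers_generator (n : Int) : List Int :=
  ((PySem.List.pyRange 2 (n + 1)).foldl pvAStep ([], [])).2

-- ===== PORT B =====
-- inner sieve loop: for j in range(i*i, n+1, i): sieve[j] = False   (j is a valid index, so List.set is exact)
def pvMark (sieve : List Bool) (i n : Int) : List Bool :=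
  (PySem.List.pyRange (i * i) (n + 1) i).foldl (fun sv j => sv.set j.toNat false) sieve

-- outer sieve loop: while i*i <= n  ('2 ≤ i' is only a totality guard: the loop starts at
-- i = 2 and i only grows, so the guard never changes the computed value)
def pvSieveLoop (n i : Int) (sieve : List Bool) : List Bool :=
  if h : 2 ≤ i ∧ i * i ≤ n then
    pvSieveLoop n (i + 1) (if sieve.getD i.toNat false then pvMark sieve i n else sieve)
  else sieve
termination_by (n + 1 - i).toNat
decreasing_by
  have h1 : i ≤ i * i := le_mul_of_one_le_left (by omega) (by omega)
  omega

-- the digit-half test on str(p): h = len(s)//2; h and sum(map(int,s[:h])) == sum(map(int,s[-h:]))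
def pvHappy (p : Int) : Bool :=
  let s := PySem.Int.toChars p
  let h := s.length / 2
  decide (h ≠ 0) &&
    (((PySem.List.slice s none (some (h : Int))).map pvDigitInt).sum ==
     ((PySem.List.slice s (some (-(h : Int))) none).map pvDigitInt).sum)

def happy_prime_numbers_generator_alt (n : Int) : List Int :=
  if n < 2 then []
  else
    let sieve := pvSieveLoop n 2 (List.replicate (n + 1).toNat true)
    (PySem.List.pyRange 2 (n + 1)).foldl
      (fun out p => if sieve.getD p.toNat false then (if pvHappy p then out ++ [p] else out) else out)
      []

-- ===== PRECONDITION & SPEC =====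
def Spec_happy_prime_numbers_generator (n : Int) (out : List Int) : Prop := out = happy_prime_numbers_generator_alt n
instance (n : Int) (out : List Int) : Decidable (Spec_happy_prime_numbers_generator n out) := by unfold Spec_happy_prime_numbers_generator; infer_instance

-- ===== CLAIM (what is proved, stated in full; the proofs are below) =====
def Claim_equal_happy_prime_numbers_generator : Prop := ∀ (n : Int), Dom_happy_prime_numbers_generator n → Spec_happy_prime_numbers_generator n (happy_prime_numbers_generator n)

-- ===== LEMMAS AND PROOFS =====

-- "k is prime", the mediating predicate of the whole proof
def pvIsP (k : Int) : Bool := decide (Nat.Prime k.toNat)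

-- A's digit-half decision, extracted from pvAStep
def pvHappyA (number : Int) : Bool :=
  let s := PySem.Int.toChars number
  let sizeNumber : Int := (s.length : Int)
  if PySem.Int.mod sizeNumber 2 == 1 ∧ sizeNumber > 1 then
    let size := PySem.Int.floordiv sizeNumber 2
    pvSumNumber (PySem.List.slice s (some 0) (some size)) ==
      pvSumNumber (PySem.List.slice s (some (size + 1)) (some sizeNumber))
  else if sizeNumber > 1 then
    let size := PySem.Int.floordiv sizeNumber 2
    pvSumNumber (PySem.List.slice s (some 0) (some size)) ==
      pvSumNumber (PySem.List.slice s (some size) (some sizeNumber))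
  else false

lemma pvAStep_eq (st : List Int × List Int) (k : Int) :
    pvAStep st k =
      if st.1.any (fun prime => PySem.Int.mod k prime == 0) then st
      else (st.1 ++ [k], if pvHappyA k then st.2 ++ [k] else st.2) := by
  simp only [pvAStep, pvHappyA]
  split_ifs <;> simp_all

lemma pvSumNumber_eq_sum_map (cs : List Char) : pvSumNumber cs = (cs.map pvDigitInt).sum := by
  have : ∀ (cs : List Char) (a : Int), cs.foldl (fun summ c => summ + pvDigitInt c) a = a + (cs.map pvDigitInt).sum := by
    intro cs; induction cs with
    | nil => simp
    | cons c cs ih => intro a; simp [List.foldl_cons, ih]; ring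
  simpa [pvSumNumber] using this cs 0

-- the two digit-half decisions agree
lemma happy_eq (k : Int) : pvHappyA k = pvHappy k := by
  unfold pvHappyA pvHappy
  simp only [pvSumNumber_eq_sum_map]
  generalize PySem.Int.toChars k = s
  set L := s.length with hL
  have hmod : PySem.Int.mod (L : Int) 2 = ((L % 2 : Nat) : Int) := by
    exact_mod_cast PySem.Int.mod_natCast L 2
  have hdiv : PySem.Int.floordiv (L : Int) 2 = ((L / 2 : Nat) : Int) := by
    exact_mod_cast PySem.Int.floordiv_natCast L 2
  set h := L / 2 with hh
  by_cases hL1 : L ≤ 1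
  · -- no halves: both sides are false
    have h0 : h = 0 := by omega
    rw [if_neg (by rw [hmod]; simp; omega), if_neg (by simp; omega)]
    simp [h0]
  · have hh0 : 0 < h := by omega
    have hgt : ((L : Nat) : Int) > 1 := by omega
    have hleft : PySem.List.slice s (some 0) (some ((h:Nat) : Int)) = s.take h := by
      rw [PySem.List.slice_zero_start, PySem.List.slice_to_natCast]
    have hright : PySem.List.slice s (some (-(h : Int))) none = s.drop (L - h) := by
      rw [PySem.List.slice_from_neg_natCast s h hh0]
    rcases Nat.even_or_odd L with he | ho
    · -- even: L = 2h, A takes its second branch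
      have hm2 : L % 2 = 0 := Nat.even_iff.1 he
      have hLe : L = 2 * h := by omega
      rw [if_neg (by rw [hmod, hm2]; simp), if_pos hgt, hdiv, hleft]
      have hdropA : PySem.List.slice s (some ((h:Nat):Int)) (some ((L:Nat):Int)) = s.drop h := by
        rw [PySem.List.slice_natCast]
        exact List.take_of_length_le (by simp [← hL])
      have hLh : L - h = h := by omega
      rw [hdropA, hright, hLh]
      simp [List.map_take, List.map_drop, hh0.ne']
    · -- odd: L = 2h+1, A takes its first branch and skips the middle digit
      have hm2 : L % 2 = 1 := Nat.odd_iff.1 ho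
      have hLo : L = 2 * h + 1 := by omega
      rw [if_pos ⟨by rw [hmod, hm2]; simp, hgt⟩, hdiv, hleft]
      have hcast : ((h:Nat):Int) + 1 = (((h+1:Nat)):Int) := by push_cast; ring
      have hdropA : PySem.List.slice s (some (((h:Nat):Int) + 1)) (some ((L:Nat):Int)) = s.drop (h+1) := by
        rw [hcast, PySem.List.slice_natCast]
        exact List.take_of_length_le (by simp [← hL])
      have hLh : L - h = h + 1 := by omega
      rw [hdropA, hright, hLh]
      simp [List.map_take, List.map_drop, hh0.ne']

-- k is composite iff some smaller prime divides it
lemma test_iff (k : Int) (h2 : 2 ≤ k) :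
    ((PySem.List.pyRange 2 k).filter pvIsP).any (fun p => PySem.Int.mod k p == 0) = !(pvIsP k) := by
  have hK : ((k.toNat : Int)) = k := by omega
  by_cases hnp : Nat.Prime k.toNat
  case neg =>
    -- k composite: its least prime factor is in the list and divides k
    rw [show pvIsP k = false by simp [pvIsP, hnp]]
    simp only [List.any_eq_true, List.mem_filter, Bool.not_false]
    refine ⟨(k.toNat.minFac : Int), ⟨?_, ?_⟩, ?_⟩
    · rw [PySem.List.mem_pyRange_one]
      have hprime := Nat.minFac_prime (n := k.toNat) (by omega)
      have hle : k.toNat.minFac ≤ k.toNat := Nat.minFac_le (by omega)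
      have hne : k.toNat.minFac ≠ k.toNat := by
        intro he
        exact hnp (Nat.prime_def_minFac.2 ⟨by omega, he⟩)
      constructor
      · exact_mod_cast hprime.two_le
      · omega
    · simp [pvIsP, Nat.minFac_prime (n := k.toNat) (by omega)]
    · rw [beq_iff_eq, PySem.Int.mod_eq_zero_iff_dvd]
      have : (k.toNat.minFac : Int) ∣ (k.toNat : Int) := Int.natCast_dvd_natCast.2 (Nat.minFac_dvd _)
      rwa [hK] at this
  case pos =>
    -- k prime: nothing smaller divides it
    rw [show pvIsP k = true by simp [pvIsP, hnp]]
    simp only [List.mem_filter, Bool.not_true, List.any_eq_false]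
    push Not
    rintro p ⟨hmem, hpp⟩
    rw [PySem.List.mem_pyRange_one] at hmem
    simp only [ne_eq, beq_iff_eq, PySem.Int.mod_eq_zero_iff_dvd]
    intro hdvd
    have hdvd' : p.toNat ∣ k.toNat := by
      have hp0 : ((p.toNat : Int)) = p := by omega
      rw [← hp0, ← hK] at hdvd
      exact_mod_cast hdvd
    rcases hnp.eq_one_or_self_of_dvd p.toNat hdvd' with h1 | h1 <;> omega

-- A's fold produces the primes below m and the kept (happy) ones
lemma afold (m : Int) (h2 : 2 ≤ m) :
    (PySem.List.pyRange 2 m).foldl pvAStep ([], []) =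
      ((PySem.List.pyRange 2 m).filter pvIsP,
       (PySem.List.pyRange 2 m).filter (fun k => pvIsP k && pvHappyA k)) := by
  induction m, h2 using Int.le_induction with
  | base => simp [PySem.List.pyRange_one_eq_nil (by omega : (2:Int) ≤ 2)]
  | succ m hm ih =>
    rw [PySem.List.pyRange_one_succ_right (by omega), List.foldl_append, ih,
      List.filter_append, List.filter_append, List.foldl_cons, List.foldl_nil, pvAStep_eq]
    rcases Bool.eq_false_or_eq_true (pvIsP m) with hp | hp
    · -- m prime: appended to both components
      rw [if_neg (by rw [test_iff m hm, hp]; simp)]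
      simp only [List.filter_singleton, hp, Bool.true_and]
      rcases Bool.eq_false_or_eq_true (pvHappyA m) with hq | hq <;> simp [hq]
    · -- m composite: state unchanged
      rw [if_pos (by rw [test_iff m hm, hp]; rfl)]
      simp [hp]

-- K has a divisor d with d*d ≤ K ("small factor")
def pvSF (K : Nat) : Prop := ∃ d, 2 ≤ d ∧ d * d ≤ K ∧ d ∣ K
-- … with the divisor below m
def pvSFB (m K : Nat) : Prop := ∃ d, 2 ≤ d ∧ d < m ∧ d * d ≤ K ∧ d ∣ K

lemma smallfac_iff (K : Nat) (h : 2 ≤ K) : pvSF K ↔ ¬ Nat.Prime K := by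
  constructor
  · rintro ⟨d, hd2, hdd, hdvd⟩ hp
    rcases (hp.eq_one_or_self_of_dvd d hdvd) with h1 | h1
    · omega
    · subst h1; nlinarith
  · intro hp
    refine ⟨K.minFac, (Nat.minFac_prime (by omega)).two_le, ?_, Nat.minFac_dvd K⟩
    have := Nat.minFac_sq_le_self (by omega) hp
    nlinarith [this]

lemma foldl_set_false_length (js : List Int) (sv : List Bool) :
    (js.foldl (fun s j => s.set j.toNat false) sv).length = sv.length := by
  induction js generalizing sv with
  | nil => rfl
  | cons j js ih => simp [List.foldl_cons, ih]

lemma foldl_set_false_getD (js : List Int) (hj : ∀ j ∈ js, 0 ≤ j) (sv : List Bool) (K : Nat) :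
    ((js.foldl (fun s j => s.set j.toNat false) sv).getD K false = false ↔
      ((K : Int) ∈ js ∧ K < sv.length) ∨ sv.getD K false = false) := by
  induction js generalizing sv with
  | nil => simp
  | cons j js ih =>
    have hj0 : 0 ≤ j := hj j (by simp)
    rw [List.foldl_cons, ih (fun x hx => hj x (by simp [hx]))]
    have hset : ∀ b, (sv.set j.toNat false).getD K b = if j.toNat = K ∧ K < sv.length then false else sv.getD K b := by
      intro b
      simp only [List.getD, List.getElem?_set]
      split_ifs with h1 h2 h3 h4 <;> simp_all
    constructor
    · rintro (⟨hm, hl⟩ | hfalse)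
      · exact Or.inl ⟨by simp [hm], by simpa using hl⟩
      · rw [hset] at hfalse
        split_ifs at hfalse with hc
        · exact Or.inl ⟨by simp; omega, hc.2⟩
        · exact Or.inr hfalse
    · rintro (⟨hm, hl⟩ | hfalse)
      · rcases List.mem_cons.1 hm with he | hm
        · right; rw [hset]; simp; omega
        · exact Or.inl ⟨hm, by simp [hl]⟩
      · by_cases hc : j.toNat = K ∧ K < sv.length
        · right; rw [hset]; simp [hc]
        · right; rw [hset]; simpa [hc, List.getD] using hfalse

lemma pvMark_length (sieve : List Bool) (i n : Int) : (pvMark sieve i n).length = sieve.length :=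
  foldl_set_false_length _ _

lemma pvMark_getD (sieve : List Bool) (i n : Int) (h2 : 2 ≤ i) (K : Nat) :
    ((pvMark sieve i n).getD K false = false ↔
      (i * i ≤ (K : Int) ∧ (K : Int) ≤ n ∧ i ∣ (K : Int) ∧ K < sieve.length) ∨
        sieve.getD K false = false) := by
  have hj : ∀ j ∈ PySem.List.pyRange (i * i) (n + 1) i, 0 ≤ j := by
    intro j hjm
    have := (PySem.List.mem_pyRange_iff_of_pos (by omega) j).1 hjm
    nlinarith [this.1]
  rw [pvMark, foldl_set_false_getD _ hj]
  have hmem : (K : Int) ∈ PySem.List.pyRange (i * i) (n + 1) i ↔ i * i ≤ (K : Int) ∧ (K : Int) ≤ n ∧ i ∣ (K : Int) := by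
    rw [PySem.List.mem_pyRange_iff_of_pos (by omega)]
    constructor
    · rintro ⟨ha, hb, hd⟩
      refine ⟨ha, by omega, ?_⟩
      have : i ∣ (K : Int) - i * i + i * i := dvd_add hd (Dvd.intro i rfl)
      simpa using this
    · rintro ⟨ha, hb, hd⟩
      exact ⟨ha, by omega, dvd_sub hd (Dvd.intro i rfl)⟩
  rw [hmem]; tauto

lemma pvSieveLoop_inv : ∀ (n i : Int) (sieve : List Bool),
    2 ≤ i → sieve.length = (n + 1).toNat →
    (∀ K < sieve.length, (sieve.getD K false = false ↔ pvSFB i.toNat K)) →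
    (pvSieveLoop n i sieve).length = (n + 1).toNat ∧
      ∀ K < (n + 1).toNat, ((pvSieveLoop n i sieve).getD K false = false ↔ pvSF K) := by
  intro n i sieve
  induction i, sieve using pvSieveLoop.induct (n := n) with
  | case1 i sieve h ih =>
    intro h2 hlen hinv
    rw [pvSieveLoop, dif_pos h]
    simp only [dite_eq_ite] at ih ⊢
    set sieve' := if sieve.getD i.toNat false then pvMark sieve i n else sieve with hs'
    have hlen' : sieve'.length = (n + 1).toNat := by
      rw [hs']; split_ifs <;> simp [pvMark_length, hlen]
    apply ih (by omega) hlen'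
    -- new invariant at i+1
    intro K hK
    rw [hlen'] at hK
    have hKn : (K : Int) ≤ n := by omega
    have hiN : i.toNat + 1 = (i+1).toNat := by omega
    have hSFB : ∀ J : Nat, (pvSFB (i+1).toNat J ↔ pvSFB i.toNat J ∨ ((i*i ≤ (J:Int)) ∧ i ∣ (J:Int))) := by
      intro J
      constructor
      · rintro ⟨d, hd2, hdi, hdd, hdvd⟩
        by_cases hdi' : d < i.toNat
        · exact Or.inl ⟨d, hd2, hdi', hdd, hdvd⟩
        · have hdeq : (d:Int) = i := by omega
          right
          constructor
          · have : (d:Int)*(d:Int) ≤ (J:Int) := by exact_mod_cast hdd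
            rw [hdeq] at this; exact this
          · have : (d:Int) ∣ (J:Int) := Int.natCast_dvd_natCast.2 hdvd
            rwa [hdeq] at this
      · rintro (⟨d, hd2, hdi, hdd, hdvd⟩ | ⟨hle, hdvd⟩)
        · exact ⟨d, hd2, by omega, hdd, hdvd⟩
        · refine ⟨i.toNat, by omega, by omega, ?_, ?_⟩
          · have : (i.toNat : Int) * i.toNat ≤ (J:Int) := by
              have : ((i.toNat : Int)) = i := by omega
              rw [this]; exact hle
            exact_mod_cast this
          · have : ((i.toNat : Int)) = i := by omega
            rw [← Int.natCast_dvd_natCast]; rw [this]; exact hdvd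
    rw [hSFB]
    by_cases hti : sieve.getD i.toNat false
    -- case sieve[i] true: marked
    · rw [hs', if_pos hti]
      rw [pvMark_getD sieve i n (by omega) K, hinv K (by omega)]
      constructor
      · rintro (⟨ha, hb, hc, hd⟩ | hf)
        · exact Or.inr ⟨ha, hc⟩
        · exact Or.inl hf
      · rintro (hf | ⟨ha, hb⟩)
        · exact Or.inr hf
        · exact Or.inl ⟨ha, hKn, hb, by omega⟩
    -- case sieve[i] false: i itself has a small factor below i
    · rw [hs', if_neg hti]
      have hii : i.toNat < sieve.length := by
        have : i ≤ i * i := le_mul_of_one_le_left (by omega) (by omega)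
        omega
      have hiSFB : pvSFB i.toNat i.toNat := by
        have := (hinv i.toNat hii).1 (by simpa using Bool.of_not_eq_true hti)
        exact this
      rw [hinv K (by omega)]
      constructor
      · exact Or.inl
      · rintro (hf | ⟨hle, hdvd⟩)
        · exact hf
        · obtain ⟨e, he2, hei, hee, hedvd⟩ := hiSFB
          refine ⟨e, he2, hei, ?_, ?_⟩
          · -- e*e ≤ i*i ≤ K
            have h1 : (e:Int)*(e:Int) ≤ i*i := by
              have : (e:Int) ≤ i := by omega
              nlinarith
            have : (e:Int)*(e:Int) ≤ (K:Int) := le_trans h1 hle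
            exact_mod_cast this
          · -- e ∣ i ∣ K
            have h1 : (e:Int) ∣ i := by
              have := Int.natCast_dvd_natCast.2 hedvd
              have hieq : ((i.toNat : Int)) = i := by omega
              rwa [hieq] at this
            have : (e:Int) ∣ (K:Int) := h1.trans hdvd
            exact_mod_cast this
  | case2 i sieve h =>
    intro h2 hlen hinv
    rw [pvSieveLoop, dif_neg h]
    refine ⟨hlen, fun K hK => ?_⟩
    rw [hinv K (by omega)]
    have hKn : (K : Int) ≤ n := by omega
    constructor
    · rintro ⟨d, hd2, hdi, hdd, hdvd⟩; exact ⟨d, hd2, hdd, hdvd⟩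
    · rintro ⟨d, hd2, hdd, hdvd⟩
      refine ⟨d, hd2, ?_, hdd, hdvd⟩
      have hii : n < i * i := by
        rcases not_and_or.1 h with hc | hc
        · omega
        · omega
      have hdd' : (d:Int) * d < i * i := by omega
      by_contra hcon
      have hid : i ≤ (d:Int) := by omega
      nlinarith

-- final sieve: entry K is true iff K is prime (2 ≤ K ≤ n)
lemma sieve_final (n : Int) (hn : 2 ≤ n) (K : Nat) (h2 : 2 ≤ K) (hK : (K : Int) ≤ n) :
    (pvSieveLoop n 2 (List.replicate (n + 1).toNat true)).getD K false = pvIsP (K : Int) := by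
  have hinv := pvSieveLoop_inv n 2 (List.replicate (n + 1).toNat true) (by omega)
    (by simp)
    (by
      intro J hJ
      constructor
      · intro hfalse
        rw [List.getD, List.getElem?_replicate, if_pos (by simpa using hJ)] at hfalse
        simp at hfalse
      · rintro ⟨d, hd2, hdlt, _, _⟩
        have : (2:Int).toNat = 2 := rfl
        omega)
  have hKlt : K < (n + 1).toNat := by omega
  have hiff := hinv.2 K hKlt
  have hP : pvSF K ↔ ¬ Nat.Prime K := smallfac_iff K h2
  have hcast : pvIsP (K : Int) = decide (Nat.Prime K) := by simp [pvIsP]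
  rcases Bool.eq_false_or_eq_true ((pvSieveLoop n 2 (List.replicate (n + 1).toNat true)).getD K false) with hb | hb
  · rw [hb] at hiff ⊢
    have hns : ¬ pvSF K := fun hsf => by simpa using hiff.2 hsf
    rw [hcast]
    simp [not_not.1 (fun hnp => hns (hP.2 hnp))]
  · rw [hb] at hiff ⊢
    have hsf : pvSF K := hiff.1 rfl
    rw [hcast]
    simp [hP.1 hsf]

lemma prod_snd_fold_eq (n : Int) (hn : 2 ≤ n) :
    happy_prime_numbers_generator n =
      (PySem.List.pyRange 2 (n + 1)).filter (fun k => pvIsP k && pvHappyA k) := by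
  rw [happy_prime_numbers_generator, afold (n + 1) (by omega)]

-- ===== VERDICT (by name: the statement is the Claim_ definition above) =====
theorem happy_prime_numbers_generator_spec : Claim_equal_happy_prime_numbers_generator := by
  intro n _
  unfold Spec_happy_prime_numbers_generator happy_prime_numbers_generator_alt
  by_cases hn : n < 2
  · rw [if_pos hn, happy_prime_numbers_generator,
      PySem.List.pyRange_one_eq_nil (by omega : n + 1 ≤ 2)]
    rfl
  · rw [if_neg hn, prod_snd_fold_eq n (by omega)]
    rw [PySem.List.foldl_congr_mem _ _
      (fun out p => if (pvIsP p && pvHappyA p) then out ++ [p] else out) []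
      (by
        intro acc p hp
        rw [PySem.List.mem_pyRange_one] at hp
        have hsf := sieve_final n (by omega) p.toNat (by omega) (by omega)
        have hpt : ((p.toNat : Int)) = p := by omega
        rw [hpt] at hsf
        rw [hsf, ← happy_eq p]
        rcases Bool.eq_false_or_eq_true (pvIsP p) with h1 | h1 <;>
          rcases Bool.eq_false_or_eq_true (pvHappyA p) with h2 | h2 <;>
            simp [h1, h2])]
    rw [PySem.List.foldl_append_if_eq_filter]
    simp
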